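-- pv_equiv track=rewrite | github.com/ParsaHaghighatgoo/Threes-game | three-phase1.py | U_kd
-- ===== SOURCE A (Python) =====
-- def U_kd(mt,k,d):
--     temp = []
--     m = 0
--     m_dic = {}
--     i0 = 0
--     for i in range(len(mt)):
--         temp += [mt[3][i]]
--
--     for j in range(len(temp)):
--         if temp[j] == 0 :
--             m_dic[i0] = j
--             m += 1
--             i0 += 1
--
--     if m == 0 :
--         return mt
--     else :
--         jaygah = k%m
--         mt[3][m_dic[jaygah]] = d
--
--     return mt
-- ===== SOURCE B (Python) =====
-- def U_kd(mt, k, d):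
--     # Count zeros among the first len(mt) entries of row 3, then rescan with a
--     # running counter to place d at the (k % m)-th zero; no index table is built.
--     # Like A, this mutates mt[3] in place and returns mt.
--     m = 0
--     for i in range(len(mt)):
--         if mt[3][i] == 0:
--             m += 1
--     if m == 0:
--         return mt
--     target = k % m
--     cnt = 0
--     for i in range(len(mt)):
--         if mt[3][i] == 0:
--             if cnt == target:
--                 mt[3][i] = d
--                 break
--             cnt += 1
--     return mt
-- ===== Notes on version B (the rewrite author's own statement) =====
-- stated objective: simpler
-- what changed: B replaces A's materialised temp copy of the row and the index dictionary m_dic with a count pass plus a rescan that keeps only a running zero counter and breaks at the (k%m)-th zero.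
import Mathlib
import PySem

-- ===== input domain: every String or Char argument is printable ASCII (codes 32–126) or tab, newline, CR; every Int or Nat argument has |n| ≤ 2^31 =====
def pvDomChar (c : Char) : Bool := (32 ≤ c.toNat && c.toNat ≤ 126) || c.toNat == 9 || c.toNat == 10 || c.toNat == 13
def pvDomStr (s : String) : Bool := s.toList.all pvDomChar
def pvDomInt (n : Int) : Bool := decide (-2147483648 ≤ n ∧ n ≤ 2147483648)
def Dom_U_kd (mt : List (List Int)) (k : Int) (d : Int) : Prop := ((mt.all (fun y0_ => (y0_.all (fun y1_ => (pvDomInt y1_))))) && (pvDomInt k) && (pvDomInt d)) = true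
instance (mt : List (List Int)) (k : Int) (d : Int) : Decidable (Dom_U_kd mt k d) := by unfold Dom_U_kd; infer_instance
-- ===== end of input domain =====

-- B drops A's temp copy and index dictionary for a count pass plus a counter rescan (objective: simpler).
-- Both Pythons mutate mt[3] in place identically; the theorems are about the returned value.

-- ===== PORT A =====
-- In-range indexing mt[3][i] is ported as getD (Pre_ excludes exactly the out-of-range
-- inputs, on which Python raises IndexError); indices are nonnegative throughout.
def U_kd (mt : List (List Int)) (k : Int) (d : Int) : List (List Int) :=
  let row3 := mt.getD 3 []
  let temp := (List.range mt.length).foldl (fun acc i => acc ++ [row3.getD i 0]) []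
  let st := (List.range temp.length).foldl
    (fun (s : PySem.Dict Int Int × Int × Int) j =>
      if temp.getD j 0 = 0 then (s.1.insert s.2.2 (j : Int), s.2.1 + 1, s.2.2 + 1) else s)
    (PySem.Dict.empty, 0, 0)
  if st.2.1 = 0 then mt
  else
    let jaygah := PySem.Int.mod k st.2.1
    let pos := st.1.getD jaygah 0
    mt.set 3 (row3.set pos.toNat d)

-- ===== PORT B =====
-- second pass: running counter of zeros, set d at the target-th zero and stop
def bFind (row3 : List Int) : List Nat → Int → Int → Option Nat
  | [], _, _ => none
  | i :: rest, cnt, target =>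
    if row3.getD i 0 = 0 then
      (if cnt = target then some i else bFind row3 rest (cnt + 1) target)
    else bFind row3 rest cnt target

def U_kd_alt (mt : List (List Int)) (k : Int) (d : Int) : List (List Int) :=
  let row3 := mt.getD 3 []
  let m := (List.range mt.length).foldl
    (fun (c : Int) i => if row3.getD i 0 = 0 then c + 1 else c) 0
  if m = 0 then mt
  else
    let target := PySem.Int.mod k m
    match bFind row3 (List.range mt.length) 0 target with
    | some i => mt.set 3 (row3.set i d)
    | none => mt

-- ===== PRECONDITION & SPEC =====
-- Pre_ excludes exactly the inputs on which Python A raises IndexError: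
-- mt[3] needs length mt ≥ 4 and the first loop reads mt[3][i] for i < len(mt).
def Pre_U_kd (mt : List (List Int)) (k : Int) (d : Int) : Prop :=
  mt = [] ∨ (4 ≤ mt.length ∧ mt.length ≤ (mt.getD 3 []).length)
instance (mt : List (List Int)) (k : Int) (d : Int) : Decidable (Pre_U_kd mt k d) := by
  unfold Pre_U_kd; infer_instance

def pvWitness_U_kd : List (List Int) × Int × Int := ([[1], [2], [3], [0, 5, 0, 7]], 5, 9)

def Spec_U_kd (mt : List (List Int)) (k : Int) (d : Int) (out : List (List Int)) : Prop := out = U_kd_alt mt k d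
instance (mt : List (List Int)) (k : Int) (d : Int) (out : List (List Int)) : Decidable (Spec_U_kd mt k d out) := by unfold Spec_U_kd; infer_instance

-- ===== CLAIM (what is proved, stated in full; the proofs are below) =====
def Claim_equal_U_kd : Prop := ∀ (mt : List (List Int)) (k : Int) (d : Int), Dom_U_kd mt k d → Pre_U_kd mt k d → Spec_U_kd mt k d (U_kd mt k d)

-- ===== LEMMAS AND PROOFS =====

-- the dictionary A's second loop builds, abstracted over the filtered zero positions
def dicZ (dic : PySem.Dict Int Int) (c : Int) : List Nat → PySem.Dict Int Int
  | [] => dic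
  | j :: rest => dicZ (dic.insert c (j : Int)) (c + 1) rest

lemma afold (p : Nat → Prop) [DecidablePred p] (l : List Nat)
    (dic : PySem.Dict Int Int) (c : Int) :
    l.foldl (fun (s : PySem.Dict Int Int × Int × Int) j =>
        if p j then (s.1.insert s.2.2 (j : Int), s.2.1 + 1, s.2.2 + 1) else s) (dic, c, c)
      = (dicZ dic c (l.filter (fun j => decide (p j))),
         c + ((l.filter (fun j => decide (p j))).length : Int),
         c + ((l.filter (fun j => decide (p j))).length : Int)) := by
  induction l generalizing dic c with
  | nil => simp [dicZ]
  | cons j rest ih =>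
    by_cases hj : p j
    · simp only [List.foldl_cons, List.filter_cons, hj, if_pos, decide_true]
      rw [ih]
      simp only [dicZ, List.length_cons, Prod.mk.injEq]
      refine ⟨trivial, ?_, ?_⟩ <;> push_cast <;> ring
    · simp only [List.foldl_cons, List.filter_cons, hj, decide_false]
      exact ih dic c

lemma dicZ_getD_lt (z : List Nat) (dic : PySem.Dict Int Int) (c q : Int) (hq : q < c) :
    (dicZ dic c z).getD q 0 = dic.getD q 0 := by
  induction z generalizing dic c with
  | nil => rfl
  | cons j rest ih =>
    rw [dicZ, ih _ _ (by omega), PySem.Dict.getD_insert, if_neg (by omega)]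

lemma dicZ_getD (z : List Nat) (dic : PySem.Dict Int Int) (c t : Int)
    (h0 : 0 ≤ t) (ht : t.toNat < z.length) :
    (dicZ dic c z).getD (c + t) 0 = ((z.getD t.toNat 0 : Nat) : Int) := by
  induction z generalizing dic c t with
  | nil => simp at ht
  | cons j rest ih =>
    rw [dicZ]
    by_cases h : t = 0
    · subst h
      simp only [add_zero, Int.toNat_zero, List.getD_cons_zero]
      rw [dicZ_getD_lt _ _ _ _ (by omega), PySem.Dict.getD_insert_self]
    · have hc : c + t = (c + 1) + (t - 1) := by ring
      rw [hc, ih _ _ _ (by omega)]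
      · have : t.toNat = (t - 1).toNat + 1 := by omega
        rw [this, List.getD_cons_succ]
      · simp at ht; omega

lemma bFind_spec (row3 : List Int) (l : List Nat) (cnt target : Int)
    (h0 : cnt ≤ target)
    (ht : (target - cnt).toNat < (l.filter (fun i => decide (row3.getD i 0 = 0))).length) :
    bFind row3 l cnt target
      = some ((l.filter (fun i => decide (row3.getD i 0 = 0))).getD (target - cnt).toNat 0) := by
  induction l generalizing cnt with
  | nil => simp at ht
  | cons i rest ih =>
    by_cases hz : row3.getD i 0 = 0
    · simp only [bFind, List.filter_cons, hz, decide_true, if_pos]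
      by_cases he : cnt = target
      · subst he
        simp
      · have h1 : cnt + 1 ≤ target := by omega
        rw [if_neg he, ih _ h1]
        · have : (target - cnt).toNat = (target - (cnt + 1)).toNat + 1 := by omega
          rw [this, List.getD_cons_succ]
        · rw [List.filter_cons, if_pos (by simpa using hz)] at ht
          simp only [List.length_cons] at ht
          omega
    · simp only [bFind, List.filter_cons, hz, decide_false, if_neg, Bool.false_eq_true,
        not_false_eq_true]
      rw [List.filter_cons, if_neg (by simpa using hz)] at ht
      exact ih cnt h0 ht

-- ===== VERDICT (by name: the statement is the Claim_ definition above) =====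
theorem U_kd_spec : Claim_equal_U_kd := by
  intro mt k d _ _
  unfold Spec_U_kd
  simp only [U_kd, U_kd_alt]
  set row3 := mt.getD 3 [] with hrow3
  set n := mt.length with hn
  set zeros := (List.range n).filter (fun i => decide (row3.getD i 0 = 0)) with hzeros
  -- A's first loop builds temp = [] ++ map of row3 over range n
  rw [PySem.List.foldl_append_singleton_eq_map]
  -- A's second loop: its predicate agrees with row3's on every visited index; then afold
  have hcong : (List.range (([] ++ List.map (fun i => row3.getD i 0) (List.range n)).length)).foldl
      (fun (s : PySem.Dict Int Int × Int × Int) (j : Nat) =>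
        if ([] ++ List.map (fun i => row3.getD i 0) (List.range n)).getD j 0 = 0 then
          (s.1.insert s.2.2 (j : Int), s.2.1 + 1, s.2.2 + 1) else s)
      (PySem.Dict.empty, 0, 0)
    = (dicZ PySem.Dict.empty 0 zeros, (zeros.length : Int), (zeros.length : Int)) := by
    refine (PySem.List.foldl_congr_mem _ _
        (fun (s : PySem.Dict Int Int × Int × Int) (j : Nat) =>
          if row3.getD j 0 = 0 then (s.1.insert s.2.2 (j : Int), s.2.1 + 1, s.2.2 + 1) else s)
        _ ?_).trans ((afold (fun i => row3.getD i 0 = 0) _ _ _).trans ?_)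
    · intro acc x hx
      have hx' : x < n := by simpa using hx
      have hgx : ([] ++ List.map (fun i => row3.getD i 0) (List.range n)).getD x 0
          = row3.getD x 0 := by
        rw [List.nil_append, List.getD_eq_getElem?_getD]
        simp [hx']
      rw [hgx]
    · simp [hzeros]
  rw [hcong, PySem.List.foldl_ite_add_one (p := fun i => row3.getD i 0 = 0)]
  simp only [zero_add, List.countP_eq_length_filter]
  rw [← hzeros]
  by_cases hm : (zeros.length : Int) = 0
  · simp [hm]
  · rw [if_neg (by simpa using hm), if_neg (by simpa using hm)]
    have hmpos : 0 < (zeros.length : Int) := by omega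
    set t := PySem.Int.mod k (zeros.length : Int) with hts
    have ht0 : 0 ≤ t := PySem.Int.mod_nonneg _ hmpos
    have htlt : t < (zeros.length : Int) := PySem.Int.mod_lt _ hmpos
    have htn : t.toNat < zeros.length := by omega
    rw [bFind_spec row3 (List.range n) 0 t ht0 (by simpa [hzeros] using htn)]
    have hd : (dicZ PySem.Dict.empty 0 zeros).getD t 0
        = ((zeros.getD t.toNat 0 : Nat) : Int) := by
      have := dicZ_getD zeros PySem.Dict.empty 0 t ht0 htn
      simpa using this
    rw [hd]
    simp [hzeros]
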